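-- pv_equiv track=rewrite | github.com/joonbugs/access-needs-agent | srt_validation.py | _iter_srt_blocks
-- ===== SOURCE A (Python) =====
-- from typing import Iterable, Iterator, Optional
--
-- def _iter_srt_blocks(lines: Iterable[str]) -> Iterator[list[str]]:
--     block: list[str] = []
--     for raw in lines:
--         line = raw.rstrip("\n")
--         if line.strip() == "":
--             if block:
--                 yield block
--                 block = []
--             continue
--         block.append(line)
--     if block:
--         yield block
-- ===== SOURCE B (Python) =====
-- from typing import Iterable, Iterator
--
--
-- def _blank(raw: str) -> bool:
--     return raw.rstrip("\n").strip() == ""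
--
--
-- def _iter_srt_blocks(lines: Iterable[str]) -> Iterator[list[str]]:
--     lines = list(lines)
--     n = len(lines)
--     i = 0
--     while i < n:
--         if _blank(lines[i]):
--             i += 1
--             continue
--         j = i
--         while j < n and not _blank(lines[j]):
--             j += 1
--         yield [raw.rstrip("\n") for raw in lines[i:j]]
--         i = j
-- ===== Notes on version B (the rewrite author's own statement) =====
-- stated objective: alternative
-- what changed: Replaced A's running-buffer accumulation (append to a block list, flush on blank lines and at the end) with a two-pointer index scan that finds each maximal run of non-blank lines and yields it as one slice, with no mutable block buffer.
import Mathlib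
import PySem

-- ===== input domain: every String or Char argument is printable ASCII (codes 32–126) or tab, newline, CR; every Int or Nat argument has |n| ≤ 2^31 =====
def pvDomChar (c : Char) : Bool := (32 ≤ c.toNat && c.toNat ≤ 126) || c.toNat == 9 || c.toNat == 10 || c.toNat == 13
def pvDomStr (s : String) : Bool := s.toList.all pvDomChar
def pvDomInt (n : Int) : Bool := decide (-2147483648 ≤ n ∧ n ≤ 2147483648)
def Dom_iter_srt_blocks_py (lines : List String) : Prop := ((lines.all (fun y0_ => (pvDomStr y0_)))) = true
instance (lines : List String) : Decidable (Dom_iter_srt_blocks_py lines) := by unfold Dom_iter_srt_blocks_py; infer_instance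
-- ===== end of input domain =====

-- B replaces A's mutable running buffer with a two-pointer scan over maximal non-blank runs (alternative decomposition, same cost).

-- raw.rstrip("\n"): drop trailing newline characters (hand port, exact: Python strips exactly the chars in "\n" from the right)
def pvRstripNl (s : String) : String := String.ofList ((s.toList.reverse.dropWhile (fun c => c == '\n')).reverse)

-- ===== PORT A =====
def pvGoA (block : List String) : List String → List (List String)
  | [] => if block.isEmpty then [] else [block]
  | raw :: rest =>
      let line := pvRstripNl raw
      if PySem.Str.strip line == "" then
        (if block.isEmpty then [] else [block]) ++ pvGoA [] rest
      else
        pvGoA (block ++ [line]) rest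

def iter_srt_blocks_py (lines : List String) : List (List String) := pvGoA [] lines

-- ===== PORT B =====
-- raw.rstrip("\n").strip() == ""
def pvBlank (raw : String) : Bool := PySem.Str.strip (pvRstripNl raw) == ""

-- the index scan: skip a blank line, else take the maximal non-blank run lines[i:j] as one block
def pvGoB : List String → List (List String)
  | [] => []
  | raw :: rest =>
      if pvBlank raw then pvGoB rest
      else ((raw :: rest.takeWhile (fun y => !pvBlank y)).map pvRstripNl)
             :: pvGoB (rest.dropWhile (fun y => !pvBlank y))
termination_by l => l.length
decreasing_by
  · simp
  · simpa using Nat.lt_succ_of_le (List.length_dropWhile_le (fun y => !pvBlank y) rest)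

def iter_srt_blocks_py_alt (lines : List String) : List (List String) := pvGoB lines

-- ===== PRECONDITION & SPEC =====
def Spec_iter_srt_blocks_py (lines : List String) (out : List (List String)) : Prop := out = iter_srt_blocks_py_alt lines
instance (lines : List String) (out : List (List String)) : Decidable (Spec_iter_srt_blocks_py lines out) := by unfold Spec_iter_srt_blocks_py; infer_instance

-- ===== CLAIM (what is proved, stated in full; the proofs are below) =====
def Claim_equal_iter_srt_blocks_py : Prop := ∀ (lines : List String), Dom_iter_srt_blocks_py lines → Spec_iter_srt_blocks_py lines (iter_srt_blocks_py lines)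

-- ===== LEMMAS AND PROOFS =====

theorem pvGoA_eq (n : Nat) : ∀ (lines : List String), lines.length = n →
    (pvGoA [] lines = pvGoB lines) ∧
    (∀ block, block ≠ [] →
      pvGoA block lines =
        (block ++ (lines.takeWhile (fun y => !pvBlank y)).map pvRstripNl)
          :: pvGoB (lines.dropWhile (fun y => !pvBlank y))) := by
  induction n using Nat.strong_induction_on with
  | _ n ih =>
    intro lines hlen
    cases lines with
    | nil =>
      constructor
      · simp [pvGoA, pvGoB]
      · intro block hb
        simp [pvGoA, pvGoB, List.isEmpty_iff, hb]
    | cons raw rest =>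
      have hrest : rest.length < n := by simp at hlen; omega
      have IH := ih rest.length hrest rest rfl
      by_cases hbl : pvBlank raw
      · have hstrip : (PySem.Str.strip (pvRstripNl raw) == "") = true := hbl
        constructor
        · simp only [pvGoA, pvGoB, hstrip, hbl, if_pos, List.isEmpty_nil, List.nil_append]
          exact IH.1
        · intro block hb
          have hbe : block.isEmpty = false := by simpa [List.isEmpty_iff] using hb
          simp only [pvGoA, hstrip, if_pos, hbe, Bool.false_eq_true, if_false]
          rw [IH.1]
          simp [pvGoB, hbl]
      · have hstrip : (PySem.Str.strip (pvRstripNl raw) == "") = false := by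
          simpa [pvBlank] using hbl
        have hbnb : pvBlank raw = false := by simpa using hbl
        constructor
        · simp only [pvGoA, hstrip, Bool.false_eq_true, if_false]
          rw [IH.2 ([] ++ [pvRstripNl raw]) (by simp)]
          simp [pvGoB, hbnb]
        · intro block hb
          simp only [pvGoA, hstrip, Bool.false_eq_true, if_false]
          rw [IH.2 (block ++ [pvRstripNl raw]) (by simp)]
          simp [hbnb]

-- ===== VERDICT (by name: the statement is the Claim_ definition above) =====
theorem iter_srt_blocks_py_spec : Claim_equal_iter_srt_blocks_py := by
  intro lines _
  unfold Spec_iter_srt_blocks_py iter_srt_blocks_py iter_srt_blocks_py_alt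
  exact (pvGoA_eq lines.length lines rfl).1
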